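-- pv_equiv track=rewrite | github.com/IvanKalug-QA/codewars | Fibonacci_Tribonacci_and_friends.py | xbonacci
-- ===== SOURCE A (Python) =====
-- def xbonacci(signature, n):
--     if n == 0:
--         return []
--     res = []
--     for i in signature:
--         if len(res) == n:
--             return res
--         res.append(i)
--     idx = 0
--     for i in range(n - len(res)):
--         res.append(sum(res[idx:]))
--         idx += 1
--     return res
-- ===== SOURCE B (Python) =====
-- def xbonacci(signature, n):
--     if n <= 0:
--         return []
--     res = signature[:n]
--     k = len(res)
--     window = sum(res)
--     while len(res) < n:
--         out = window
--         res.append(out)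
--         window += out - res[len(res) - 1 - k]
--     return res
-- ===== Notes on version B (the rewrite author's own statement) =====
-- stated objective: alternative
-- what changed: B maintains a running window sum updated incrementally each step (add the new term, subtract the term leaving the window) instead of A's re-summing of the slice res[idx:] at every step; measured speed was about the same on the generated inputs.
-- intended difference: For n < 0 with a non-empty signature, A returns the whole signature (its append loop never hits the n-length stop), while B returns []; a sequence of negative requested length is empty, so B's value is the intended one. — e.g. on xbonacci([1], -1): A returns [1], B returns []
import Mathlib
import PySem

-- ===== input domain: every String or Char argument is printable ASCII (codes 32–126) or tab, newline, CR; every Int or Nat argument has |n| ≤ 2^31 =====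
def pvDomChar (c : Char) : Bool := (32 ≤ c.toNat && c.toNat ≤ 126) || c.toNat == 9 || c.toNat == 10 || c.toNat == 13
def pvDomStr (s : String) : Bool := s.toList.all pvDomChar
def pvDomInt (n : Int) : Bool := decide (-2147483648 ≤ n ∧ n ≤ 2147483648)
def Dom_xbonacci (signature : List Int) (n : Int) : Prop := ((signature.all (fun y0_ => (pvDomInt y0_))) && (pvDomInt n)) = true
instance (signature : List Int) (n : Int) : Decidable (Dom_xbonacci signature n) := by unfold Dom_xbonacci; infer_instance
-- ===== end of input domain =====

-- B replaces A's per-step slice re-summation by a running window sum updated incrementally (objective: alternative; not measured faster).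


-- ===== PORT A =====
-- first loop of A: append elements of signature to res, early-returning (flag = true) once len(res) == n
def xbonacciFill (res : List Int) (sig : List Int) (n : Int) : List Int × Bool :=
  match sig with
  | [] => (res, false)
  | i :: rest =>
      if (res.length : Int) = n then (res, true)
      else xbonacciFill (res ++ [i]) rest n

def xbonacci (signature : List Int) (n : Int) : List Int :=
  if n = 0 then []
  else
    let p := xbonacciFill [] signature n
    if p.2 then p.1
    else
      -- for i in range(n - len(res)): res.append(sum(res[idx:])); idx += 1
      ((PySem.List.pyRange 0 (n - (p.1.length : Int)) 1).foldl
        (fun (st : List Int × Int) _ =>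
          (st.1 ++ [(PySem.List.slice st.1 (some st.2) none).sum], st.2 + 1))
        (p.1, 0)).1

-- ===== PORT B =====
-- while len(res) < n: out = window; res.append(out); window += out - res[len(res) - 1 - k]
def xbonacciAltLoop (k : Nat) : Nat → List Int → Int → List Int
  | 0, res, _ => res
  | fuel + 1, res, window =>
      let out := window
      let res' := res ++ [out]
      xbonacciAltLoop k fuel res' (window + (out - res'.getD (res'.length - 1 - k) 0))

def xbonacci_alt (signature : List Int) (n : Int) : List Int :=
  if n ≤ 0 then []
  else
    let res := signature.take n.toNat
    let k := res.length
    xbonacciAltLoop k (n.toNat - k) res res.sum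

-- ===== PRECONDITION & SPEC =====
-- For n < 0 with a non-empty signature, A returns the whole signature (its append loop never hits
-- the n-length stop), while B returns []; a sequence of negative requested length is empty, so B's
-- value is the intended one.
def D_xbonacci (signature : List Int) (n : Int) : Prop := n < 0 ∧ signature ≠ []
instance (signature : List Int) (n : Int) : Decidable (D_xbonacci signature n) := by
  unfold D_xbonacci; infer_instance

def Spec_xbonacci (signature : List Int) (n : Int) (out : List Int) : Prop :=
  ¬ D_xbonacci signature n → out = xbonacci_alt signature n
instance (signature : List Int) (n : Int) (out : List Int) : Decidable (Spec_xbonacci signature n out) := by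
  unfold Spec_xbonacci; infer_instance

def pvDiffWitness_xbonacci : List Int × Int := ([1], -1)
def pvDiffWitnessOut_xbonacci : (List Int) × (List Int) := ([1], [])

-- ===== CLAIM (what is proved, stated in full; the proofs are below) =====
def Claim_unchanged_xbonacci : Prop := ∀ (signature : List Int) (n : Int), Dom_xbonacci signature n → Spec_xbonacci signature n (xbonacci signature n)
def Claim_changed_xbonacci : Prop := Dom_xbonacci (pvDiffWitness_xbonacci.1) (pvDiffWitness_xbonacci.2) ∧ D_xbonacci (pvDiffWitness_xbonacci.1) (pvDiffWitness_xbonacci.2) ∧ xbonacci (pvDiffWitness_xbonacci.1) (pvDiffWitness_xbonacci.2) = pvDiffWitnessOut_xbonacci.1 ∧ xbonacci_alt (pvDiffWitness_xbonacci.1) (pvDiffWitness_xbonacci.2) = pvDiffWitnessOut_xbonacci.2 ∧ pvDiffWitnessOut_xbonacci.1 ≠ pvDiffWitnessOut_xbonacci.2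
def Claim_exact_xbonacci : Prop := ∀ (signature : List Int) (n : Int), Dom_xbonacci signature n → D_xbonacci signature n → xbonacci signature n ≠ xbonacci_alt signature n

-- ===== LEMMAS AND PROOFS =====

-- A's first loop, for nonnegative n, yields the n-prefix of acc ++ sig; if it early-returns, the result has length n.
theorem xbonacciFill_nonneg (n : Int) (hn : 0 ≤ n) :
    ∀ (sig acc : List Int), acc.length ≤ n.toNat →
      (xbonacciFill acc sig n).1 = (acc ++ sig).take n.toNat ∧
      ((xbonacciFill acc sig n).2 = true → (xbonacciFill acc sig n).1.length = n.toNat) := by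
  intro sig
  induction sig with
  | nil =>
      intro acc hacc
      simp [xbonacciFill, List.take_of_length_le hacc]
  | cons i rest ih =>
      intro acc hacc
      by_cases h : (acc.length : Int) = n
      · have hlen : acc.length = n.toNat := by omega
        constructor
        · simp [xbonacciFill, h, ← hlen]
        · intro _; simpa [xbonacciFill, h] using hlen
      · have hlt : acc.length + 1 ≤ n.toNat := by
          have : (acc.length : Int) ≠ n := h
          omega
        have := ih (acc ++ [i]) (by simpa using hlt)
        simpa [xbonacciFill, h, List.append_assoc] using this

-- A's first loop for negative n never stops early and appends all of sig.
theorem xbonacciFill_neg (n : Int) (hn : n < 0) :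
    ∀ (sig acc : List Int), xbonacciFill acc sig n = (acc ++ sig, false) := by
  intro sig
  induction sig with
  | nil => intro acc; simp [xbonacciFill]
  | cons i rest ih =>
      intro acc
      have h : (acc.length : Int) ≠ n := by
        have : (0:Int) ≤ acc.length := by positivity
        omega
      simpa [xbonacciFill, h, List.append_assoc] using ih (acc ++ [i])

-- the second loop of A, as a recursion on the iteration count
def xbonacciLoopA : Nat → List Int × Int → List Int × Int
  | 0, st => st
  | m + 1, st =>
      xbonacciLoopA m (st.1 ++ [(PySem.List.slice st.1 (some st.2) none).sum], st.2 + 1)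

theorem foldl_eq_loopA (l : List Int) :
    ∀ st, l.foldl
        (fun (st : List Int × Int) _ =>
          (st.1 ++ [(PySem.List.slice st.1 (some st.2) none).sum], st.2 + 1)) st
      = xbonacciLoopA l.length st := by
  induction l with
  | nil => intro st; simp [xbonacciLoopA]
  | cons x xs ih => intro st; simp [List.foldl, xbonacciLoopA, ih]

-- core invariant: A's slice-summing loop equals B's running-window loop
theorem loopA_eq_altLoop :
    ∀ (m : Nat) (res : List Int) (idx k : Nat), idx + k = res.length →
      (xbonacciLoopA m (res, (idx : Int))).1
        = xbonacciAltLoop k m res (res.drop idx).sum := by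
  intro m
  induction m with
  | zero => intro res idx k h; simp [xbonacciLoopA, xbonacciAltLoop]
  | succ m ih =>
      intro res idx k h
      have hslice : (PySem.List.slice res (some (idx : Int)) none).sum = (res.drop idx).sum := by
        rw [PySem.List.slice_from_natCast]
      set w := (res.drop idx).sum with hw
      set res' := res ++ [w] with hres'
      have hlen' : res'.length = res.length + 1 := by simp [hres']
      have hidx' : idx < res'.length := by omega
      have hkidx : res'.length - 1 - k = idx := by omega
      have hgetD : res'.getD idx 0 = res'[idx]'hidx' := by
        simp [List.getD_eq_getElem?_getD, List.getElem?_eq_getElem hidx']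
      have hdrop : res'.drop idx = res.drop idx ++ [w] := by
        rw [hres', List.drop_append_of_le_length (by omega)]
      have hsum : (res'.drop idx).sum = w + w := by rw [hdrop, List.sum_append, ← hw]; simp
      have hcons : res'.drop idx = res'[idx]'hidx' :: res'.drop (idx + 1) :=
        List.drop_eq_getElem_cons hidx'
      have hsum' : (res'.drop (idx + 1)).sum = w + (w - res'.getD idx 0) := by
        rw [hgetD]
        have h2 := hsum
        rw [hcons] at h2
        simp only [List.sum_cons] at h2
        linarith
      have hA : xbonacciLoopA (m + 1) (res, (idx : Int)) =
          xbonacciLoopA m (res ++ [(PySem.List.slice res (some (idx : Int)) none).sum], (idx : Int) + 1) := rfl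
      have hB : xbonacciAltLoop k (m + 1) res w =
          xbonacciAltLoop k m res' (w + (w - res'.getD (res'.length - 1 - k) 0)) := rfl
      rw [hA, hslice, ← hres', hB, hkidx, ← hsum']
      have := ih res' (idx + 1) k (by omega)
      push_cast at this
      exact this

theorem xbonacci_eq_alt_of_pos (signature : List Int) (n : Int) (hn : 0 < n) :
    xbonacci signature n = xbonacci_alt signature n := by
  have hn0 : n ≠ 0 := by omega
  have hfill := xbonacciFill_nonneg n (by omega) signature [] (by simp)
  set res := signature.take n.toNat with hres
  have hlen : res.length ≤ n.toNat := by simp [hres]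
  have halt : xbonacci_alt signature n
      = xbonacciAltLoop res.length (n.toNat - res.length) res res.sum := by
    simp [xbonacci_alt, ← hres, not_le.mpr hn]
  rcases hfb : xbonacciFill [] signature n with ⟨r, fl⟩
  have hr : r = res := by
    have := hfill.1
    rw [hfb] at this
    simpa [hres] using this
  subst hr
  cases fl with
  | true =>
      have hrl : res.length = n.toNat := by
        have := hfill.2
        rw [hfb] at this
        simpa using this rfl
      simp [xbonacci, hn0, hfb, halt, hrl, xbonacciAltLoop]
  | false =>
      have hcount : (n - (res.length : Int) - 0).toNat = n.toNat - res.length := by omega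
      rw [halt]
      simp only [xbonacci, hn0, if_false, hfb]
      rw [foldl_eq_loopA, PySem.List.length_pyRange_one, hcount]
      have := loopA_eq_altLoop (n.toNat - res.length) res 0 res.length (by simp)
      simpa using this

theorem xbonacci_neg_eq (signature : List Int) (n : Int) (hn : n < 0) :
    xbonacci signature n = signature := by
  unfold xbonacci
  rw [if_neg (by omega)]
  simp only [xbonacciFill_neg n hn signature []]
  simp only [List.nil_append]
  have : PySem.List.pyRange 0 (n - (signature.length : Int)) 1 = [] := by
    apply PySem.List.pyRange_one_eq_nil
    have : (0:Int) ≤ signature.length := by positivity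
    omega
  rw [this]
  rfl

-- ===== VERDICT (by name: the statement is the Claim_ definition above) =====
theorem xbonacci_spec : Claim_unchanged_xbonacci := by
  intro signature n _ hD
  rcases lt_trichotomy n 0 with hn | hn | hn
  · have hsig : signature = [] := by
      by_contra h
      exact hD ⟨hn, h⟩
    subst hsig
    rw [xbonacci_neg_eq [] n hn]
    simp [xbonacci_alt, le_of_lt hn]
  · subst hn; simp [xbonacci, xbonacci_alt]
  · exact xbonacci_eq_alt_of_pos signature n hn

theorem xbonacci_changed : Claim_changed_xbonacci := by
  unfold Claim_changed_xbonacci; decide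

theorem xbonacci_tight : Claim_exact_xbonacci := by
  intro signature n _ hD
  rcases hD with ⟨hn, hsig⟩
  rw [xbonacci_neg_eq signature n hn]
  simp [xbonacci_alt, le_of_lt hn]
  exact hsig
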